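-- pv_equiv track=rewrite | github.com/mohdimran-3pg/python-assesment | credit_card_validator.py | checkDuplicateDigits
-- ===== SOURCE A (Python) =====
-- def checkDuplicateDigits(creditcardnumber):
--
-- 	arrCreditCardNumber = list(creditcardnumber.replace("-",""))
-- 	counter = 0
-- 	occurance = 0
-- 	last_char = arrCreditCardNumber[0]
-- 	while counter < len(arrCreditCardNumber):
--
-- 		if last_char == arrCreditCardNumber[counter]:
-- 			occurance += 1
-- 		else:
-- 			occurance = 1
--
-- 		if occurance == 4:
-- 			occurance = 1
-- 			return False
--
-- 		if arrCreditCardNumber[counter] == "-":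
-- 			if (counter != 4 and counter != 9 and counter != 14):
-- 				return False
--
-- 		last_char = arrCreditCardNumber[counter]
-- 		counter += 1
-- 	return True
-- ===== SOURCE B (Python) =====
-- def checkDuplicateDigits(creditcardnumber):
--     digits = creditcardnumber.replace("-", "")
--     return not any(c * 4 in digits for c in digits)
-- ===== Notes on version B (the rewrite author's own statement) =====
-- stated objective: simpler
-- what changed: Replaces the manual index/last-char/occurrence-counter while loop (with its dead dash-position branch) by a two-line substring test: strip dashes once and ask whether any character's four-fold repetition occurs as a substring; Pre_ excludes only the all-dash/empty inputs, on which A raises IndexError (B returns True there).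
import Mathlib
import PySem

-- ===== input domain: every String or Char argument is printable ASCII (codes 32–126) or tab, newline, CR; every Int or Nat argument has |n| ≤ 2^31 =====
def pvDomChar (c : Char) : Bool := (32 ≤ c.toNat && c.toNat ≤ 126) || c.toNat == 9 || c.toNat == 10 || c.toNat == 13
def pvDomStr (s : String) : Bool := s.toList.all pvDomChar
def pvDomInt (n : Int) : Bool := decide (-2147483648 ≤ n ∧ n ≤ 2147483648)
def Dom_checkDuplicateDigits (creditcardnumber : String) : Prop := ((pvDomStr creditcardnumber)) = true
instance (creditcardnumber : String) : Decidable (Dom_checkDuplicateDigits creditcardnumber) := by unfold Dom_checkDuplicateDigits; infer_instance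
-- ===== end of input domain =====

-- ===== PORT A =====
-- B replaces A's index/counter/occurrence while-loop by a substring test (objective: simpler).
-- A raises IndexError when the input contains no non-dash character; Pre_ excludes that, B returns True there.
-- Port of A's while loop: counter indexes arr; occurance/last_char carried; the dash branch is kept verbatim.
def checkDuplicateDigitsLoop (arr : List Char) (counter : Nat) (occurance : Int) (last_char : Char) : Bool :=
  if h : counter < arr.length then
    let c := arr[counter]
    let occurance' := if last_char == c then occurance + 1 else 1
    if occurance' == 4 then false
    else if c == '-' && !(counter == 4 || counter == 9 || counter == 14) then false
    else checkDuplicateDigitsLoop arr (counter + 1) occurance' c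
  else true
termination_by arr.length - counter

def checkDuplicateDigits (creditcardnumber : String) : Bool :=
  let arr := (PySem.Str.replace creditcardnumber "-" "").toList
  match PySem.List.pyGet? arr (0 : Int) with
  | none => true   -- Python raises IndexError here (arrCreditCardNumber[0]); excluded by Pre_
  | some last_char => checkDuplicateDigitsLoop arr 0 0 last_char

-- ===== PORT B =====
def checkDuplicateDigits_alt (creditcardnumber : String) : Bool :=
  let digits := PySem.Str.replace creditcardnumber "-" ""
  !(digits.toList.any (fun c => PySem.Str.isIn (String.ofList [c, c, c, c]) digits))

-- ===== PRECONDITION & SPEC =====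
-- Pre_ excludes exactly the inputs with no non-dash character, on which A raises IndexError.
def Pre_checkDuplicateDigits (creditcardnumber : String) : Prop :=
  (creditcardnumber.toList.any (fun c => c != '-')) = true
instance (creditcardnumber : String) : Decidable (Pre_checkDuplicateDigits creditcardnumber) := by
  unfold Pre_checkDuplicateDigits; infer_instance
def pvWitness_checkDuplicateDigits : String := "5"

def Spec_checkDuplicateDigits (creditcardnumber : String) (out : Bool) : Prop := out = checkDuplicateDigits_alt creditcardnumber
instance (creditcardnumber : String) (out : Bool) : Decidable (Spec_checkDuplicateDigits creditcardnumber out) := by unfold Spec_checkDuplicateDigits; infer_instance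

-- ===== CLAIM (what is proved, stated in full; the proofs are below) =====
def Claim_equal_checkDuplicateDigits : Prop := ∀ (creditcardnumber : String), Dom_checkDuplicateDigits creditcardnumber → Pre_checkDuplicateDigits creditcardnumber → Spec_checkDuplicateDigits creditcardnumber (checkDuplicateDigits creditcardnumber)

-- ===== LEMMAS AND PROOFS =====

-- a window of four equal consecutive characters (proof-side characterisation)
def win4 : List Char → Bool
  | a :: b :: c :: d :: t => (a == b && b == c && c == d) || win4 (b :: c :: d :: t)
  | _ => false

-- length of the maximal equal prefix
def countLead (c : Char) : List Char → Nat
  | [] => 0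
  | x :: t => if x = c then 1 + countLead c t else 0

-- the stripped list: replace s "-" "" is just filtering out dashes
theorem replaceGo_filter (l : List Char) : ∀ (fuel : Nat) (acc : List Char), l.length ≤ fuel →
    PySem.Chars.replace.go ['-'] [] fuel l acc = acc.reverse ++ l.filter (· ≠ '-') := by
  induction l with
  | nil => intro fuel acc _; cases fuel <;> simp [PySem.Chars.replace.go]
  | cons c t ih =>
    intro fuel acc hf
    cases fuel with
    | zero => simp at hf
    | succ fuel =>
      simp only [PySem.Chars.replace.go]
      by_cases hc : c = '-'
      · subst hc
        rw [if_pos (by simp [List.isPrefixOf])]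
        simp only [List.length_cons, List.length_nil, List.drop_succ_cons, List.drop_zero,
          List.reverse_nil, List.nil_append]
        simp only [List.length_cons] at hf
        rw [ih fuel acc (by omega)]
        simp
      · rw [if_neg (by simp [List.isPrefixOf, Ne.symm hc])]
        simp only [List.length_cons] at hf
        rw [ih fuel (c :: acc) (by omega)]
        simp [hc]

theorem charsReplace_dash_eq_filter (l : List Char) :
    PySem.Chars.replace l ['-'] [] = l.filter (· ≠ '-') := by
  rw [PySem.Chars.replace]
  rw [if_neg (by simp)]
  simpa using replaceGo_filter l l.length [] le_rfl

theorem replace_dash_eq_filter (s : String) :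
    (PySem.Str.replace s "-" "").toList = s.toList.filter (· ≠ '-') := by
  rw [PySem.Str.toList_replace]
  exact charsReplace_dash_eq_filter s.toList

theorem win4_cons4 (a b c d : Char) (t : List Char) :
    win4 (a :: b :: c :: d :: t) = ((a == b && b == c && c == d) || win4 (b :: c :: d :: t)) := rfl

theorem win4_short (l : List Char) (h : l.length < 4) : win4 l = false := by
  match l, h with
  | [], _ => rfl
  | [_], _ => rfl
  | [_, _], _ => rfl
  | [_, _, _], _ => rfl
  | _ :: _ :: _ :: _ :: _, h => simp only [List.length_cons] at h; omega

theorem win4_iff (l : List Char) : win4 l = true ↔ ∃ c, [c, c, c, c] <:+: l := by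
  fun_induction win4 l with
  | case1 a b c d t ih =>
    constructor
    · intro h
      rcases Bool.or_eq_true_iff.mp h with h | h
      · simp only [Bool.and_eq_true, beq_iff_eq] at h
        obtain ⟨⟨h1, h2⟩, h3⟩ := h
        refine ⟨a, [], t, ?_⟩
        simp [← h1, ← h2, ← h3]
      · rcases ih.mp h with ⟨x, hx⟩
        exact ⟨x, hx.trans (List.suffix_cons a (b :: c :: d :: t)).isInfix⟩
    · rintro ⟨x, hx⟩
      rcases List.infix_cons_iff.mp hx with hp | hi
      · rcases hp with ⟨r, hr⟩
        simp only [List.cons_append, List.nil_append, List.cons.injEq] at hr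
        obtain ⟨h1, h2, h3, h4, -⟩ := hr
        subst h1; subst h2; subst h3; subst h4
        simp
      · exact Bool.or_eq_true_iff.mpr (Or.inr (ih.mpr ⟨x, hi⟩))
  | case2 l h =>
    simp only [Bool.false_eq_true, false_iff]
    rintro ⟨c, hc⟩
    have hlen : l.length < 4 := by
      rcases l with _ | ⟨a, _ | ⟨b, _ | ⟨c', _ | ⟨d, t⟩⟩⟩⟩
      · simp
      · simp
      · simp
      · simp
      · exact (h a b c' d t rfl).elim
    have := hc.length_le
    simp only [List.length_cons, List.length_nil] at this
    omega

-- B's any-test computes win4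
theorem any_eq_win4 (l : List Char) :
    (l.any (fun c => PySem.Chars.isIn [c, c, c, c] l)) = win4 l := by
  by_cases h : win4 l = true
  · rw [h]
    rcases (win4_iff l).mp h with ⟨c, hc⟩
    apply List.any_eq_true.mpr
    exact ⟨c, hc.sublist.mem (by simp), (PySem.Chars.isIn_iff_infix _ _).mpr hc⟩
  · rw [Bool.not_eq_true] at h
    rw [h]
    apply List.any_eq_false.mpr
    intro c hcl hin
    have := (win4_iff l).mpr ⟨c, (PySem.Chars.isIn_iff_infix _ _).mp hin⟩
    simp [h] at this

theorem countLead_ge3_iff (x : Char) (r : List Char) (b c d : Char) (t : List Char)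
    (hr : r = b :: c :: d :: t) :
    (3 ≤ countLead x r) ↔ (b = x ∧ c = x ∧ d = x) := by
  subst hr
  by_cases hb : b = x <;> by_cases hc : c = x <;> by_cases hd : d = x <;>
    simp [countLead, hb, hc, hd] <;> omega

-- one unfolding step of win4 against the run counter
theorem winStep (x : Char) (r : List Char) :
    win4 (x :: r) = (decide (3 ≤ countLead x r) || win4 r) := by
  rcases r with _ | ⟨b, _ | ⟨c, _ | ⟨d, t⟩⟩⟩
  · simp [win4, countLead]
  · rw [win4_short _ (by simp), win4_short _ (by simp)]
    simp [countLead]; split_ifs <;> omega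
  · rw [win4_short _ (by simp), win4_short _ (by simp)]
    simp [countLead]; split_ifs <;> omega
  · rw [win4_cons4]
    congr 1
    rw [show (decide (3 ≤ countLead x (b :: c :: d :: t))) = decide (b = x ∧ c = x ∧ d = x) from
      decide_eq_decide.mpr (countLead_ge3_iff x _ b c d t rfl)]
    rw [Bool.eq_iff_iff]
    simp only [Bool.and_eq_true, beq_iff_eq, decide_eq_true_eq]
    constructor
    · rintro ⟨⟨h1, h2⟩, h3⟩; subst_vars; simp
    · rintro ⟨h1, h2, h3⟩; subst_vars; simp

theorem countLead_win4 (c : Char) (l : List Char) (h : 4 ≤ countLead c l) : win4 l = true := by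
  rcases l with _ | ⟨x, r⟩
  · simp [countLead] at h
  · rw [winStep]
    simp only [countLead] at h
    split at h
    · rename_i hx; subst hx
      simp; omega
    · omega

-- the loop invariant for A's while loop (no dashes remain in arr)
theorem loop_invariant (arr : List Char) (counter : Nat) (occ : Int) (last : Char)
    (hd : ∀ c ∈ arr, c ≠ '-') (hc : counter ≤ arr.length) (h0 : 0 ≤ occ) (h3 : occ ≤ 3) :
    checkDuplicateDigitsLoop arr counter occ last =
      !(decide (4 ≤ occ + (countLead last (arr.drop counter) : Int)) || win4 (arr.drop counter)) := by
  by_cases h : counter < arr.length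
  · rw [checkDuplicateDigitsLoop, dif_pos h]
    have hdrop : arr.drop counter = arr[counter] :: arr.drop (counter + 1) :=
      List.drop_eq_getElem_cons h
    have hnd : arr[counter] ≠ '-' := hd _ (arr.getElem_mem h)
    have hdash : ¬ ((arr[counter] == '-' && !(counter == 4 || counter == 9 || counter == 14)) = true) := by
      intro hcond
      rw [Bool.and_eq_true, beq_iff_eq] at hcond
      exact hnd hcond.1
    by_cases he : last = arr[counter]
    · -- same char: occurrence grows
      subst he
      simp only [beq_self_eq_true, if_true]
      have hcl : countLead arr[counter] (arr.drop counter) = 1 + countLead arr[counter] (arr.drop (counter + 1)) := by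
        rw [hdrop, countLead, if_pos rfl]
      by_cases h4 : occ + 1 = 4
      · rw [if_pos (by simp [h4])]
        have hx : 4 ≤ occ + (countLead arr[counter] (arr.drop counter) : Int) := by
          rw [hcl]; push_cast; omega
        simp only [decide_eq_true hx, Bool.true_or, Bool.not_true]
      · rw [if_neg (by simp [h4]), if_neg hdash]
        rw [loop_invariant arr (counter + 1) (occ + 1) arr[counter] hd h (by omega) (by omega)]
        rw [hcl, hdrop, winStep]
        set cl := countLead arr[counter] (arr.drop (counter + 1)) with hclv
        cases hw : win4 (arr.drop (counter + 1))
        · simp only [hw, Bool.or_false]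
          congr 1
          rw [Bool.eq_iff_iff]
          simp only [Bool.or_eq_true, decide_eq_true_eq]
          push_cast
          omega
        · simp [hw]
    · -- different char: occurrence resets to 1
      simp only [beq_iff_eq]
      rw [if_neg he]
      rw [if_neg (show ¬((1 : Int) = 4) from by norm_num)]
      rw [if_neg (by intro hcond; rw [Bool.and_eq_true, beq_iff_eq] at hcond; exact hnd hcond.1 :
        ¬ ((arr[counter] == '-' && !(counter == 4 || counter == 9 || counter == 14)) = true))]
      rw [loop_invariant arr (counter + 1) 1 arr[counter] hd h (by omega) (by omega)]
      rw [hdrop, winStep, countLead, if_neg (fun hh => he hh.symm)]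
      have hocc : ¬ (4 ≤ occ + ((0 : Nat) : Int)) := by push_cast; omega
      rw [decide_eq_false hocc]
      simp only [Bool.false_or]
      set cl := countLead arr[counter] (arr.drop (counter + 1)) with hclv
      have : (decide (4 ≤ (1 : Int) + (cl : Int))) = (decide (3 ≤ cl)) := by
        rw [decide_eq_decide]; push_cast; omega
      rw [this]
  · have hce : counter = arr.length := by omega
    rw [checkDuplicateDigitsLoop, dif_neg h, hce, List.drop_length]
    simp [countLead, win4]
    omega
termination_by arr.length - counter

-- ===== VERDICT (by name: the statement is the Claim_ definition above) =====
theorem checkDuplicateDigits_spec : Claim_equal_checkDuplicateDigits := by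
  intro s _ hpre
  unfold Spec_checkDuplicateDigits checkDuplicateDigits checkDuplicateDigits_alt
  rcases harr : (s.toList.filter (· ≠ '-')) with _ | ⟨h, t⟩
  · exfalso
    obtain ⟨c, hc, hcd⟩ := List.any_eq_true.mp hpre
    rw [bne_iff_ne] at hcd
    have := List.filter_eq_nil_iff.mp harr c hc
    simp [hcd] at this
  · have hnd : ∀ c ∈ (h :: t), c ≠ '-' := by
      intro c hc
      have hmem : c ∈ s.toList.filter (· ≠ '-') := harr ▸ hc
      simpa using List.of_mem_filter hmem
    have hB : ∀ c, PySem.Str.isIn (String.ofList [c, c, c, c]) (PySem.Str.replace s "-" "") =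
        PySem.Chars.isIn [c, c, c, c] (h :: t) := by
      intro c
      have harr' : List.filter (fun x => !decide (x = '-')) s.toList = h :: t := by
        simpa using harr
      simp [PySem.Str.isIn, replace_dash_eq_filter, charsReplace_dash_eq_filter, harr']
    have hget : PySem.List.pyGet? (h :: t) (0 : Int) = some h := by
      simp [PySem.List.pyGet?, PySem.List.pyIdx?]
    simp only [replace_dash_eq_filter, harr, hget]
    rw [loop_invariant (h :: t) 0 0 h hnd (by simp) le_rfl (by norm_num)]
    simp only [List.drop_zero, hB, any_eq_win4]
    by_cases hcl4 : 4 ≤ (0 : Int) + (countLead h (h :: t) : Int)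
    · have hw : win4 (h :: t) = true := countLead_win4 h (h :: t) (by push_cast at hcl4; omega)
      simp [hw, hcl4]
    · simp
      intro _
      omega
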